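-- pv_equiv track=rewrite | github.com/DeBeer05/WLW | back-end/Wirelesworks/Scan/scan_service.py | _sort_by_company
-- ===== SOURCE A (Python) =====
-- def _sort_by_company(devices):
--     """Sort devices by company name"""
--     company_dict = {}
--     for mac, device_info in devices.items():
--         company = device_info.get('company_name')
--         if company and company != 'No Name Found':
--             if company not in company_dict:
--                 company_dict[company] = {}
--             company_dict[company][mac] = device_info
--     return company_dict
-- ===== SOURCE B (Python) =====
-- def _sort_by_company(devices):
--     """Sort devices by company name"""
--     kept = [(c, mac, info) for mac, info in devices.items()
--             if (c := info.get('company_name')) and c != 'No Name Found']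
--     companies = list(dict.fromkeys(c for c, _, _ in kept))
--     return {c: {mac: info for cc, mac, info in kept if cc == c}
--             for c in companies}
-- ===== Notes on version B (the rewrite author's own statement) =====
-- stated objective: alternative
-- what changed: Replaces A's single pass that incrementally grows a dict-of-dicts (create-bucket-then-assign per device) with a filter-comprehension producing (company, mac, info) triples, an ordered dedup of company names via dict.fromkeys, and a nested dict comprehension grouping the triples per company.
import Mathlib
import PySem

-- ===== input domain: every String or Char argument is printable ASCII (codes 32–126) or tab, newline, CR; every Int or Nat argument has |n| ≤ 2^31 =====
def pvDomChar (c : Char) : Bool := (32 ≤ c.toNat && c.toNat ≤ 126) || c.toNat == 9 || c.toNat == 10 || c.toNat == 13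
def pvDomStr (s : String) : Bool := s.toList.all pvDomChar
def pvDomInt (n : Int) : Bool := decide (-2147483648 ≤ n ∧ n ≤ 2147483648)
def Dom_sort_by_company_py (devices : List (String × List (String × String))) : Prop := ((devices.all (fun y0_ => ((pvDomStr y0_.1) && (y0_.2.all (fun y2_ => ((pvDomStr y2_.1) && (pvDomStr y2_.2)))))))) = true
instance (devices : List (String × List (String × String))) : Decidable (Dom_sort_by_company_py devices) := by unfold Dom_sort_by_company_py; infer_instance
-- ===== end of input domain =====

-- B replaces A's incremental dict-of-dicts bucketing with a filter into (company, mac, info)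
-- triples, an ordered dedup of the company names, and a per-company grouping comprehension
-- (objective: alternative decomposition, same results).


-- ===== PORT A =====
-- A's loop body: look up 'company_name', keep truthy names ≠ 'No Name Found',
-- create the company bucket if missing, then company_dict[company][mac] = device_info.
def aStep (d : PySem.Dict String (PySem.Dict String (List (String × String))))
    (p : String × List (String × String)) :
    PySem.Dict String (PySem.Dict String (List (String × String))) :=
  match (PySem.Dict.ofList p.2).get? "company_name" with
  | some company =>
    if company ≠ "" ∧ company ≠ "No Name Found" then
      let d1 := if d.contains company then d else d.insert company PySem.Dict.empty
      d1.insert company ((d1.getD company PySem.Dict.empty).insert p.1 p.2)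
    else d
  | none => d

def sort_by_company_py (devices : List (String × List (String × String))) :
    List (String × List (String × List (String × String))) :=
  (devices.foldl aStep PySem.Dict.empty).items.map (fun q => (q.1, q.2.items))

-- ===== PORT B =====
-- B's comprehension filter: '(c := info.get("company_name")) and c != "No Name Found"'.
def bKeep (p : String × List (String × String)) :
    Option (String × String × List (String × String)) :=
  match (PySem.Dict.ofList p.2).get? "company_name" with
  | some c => if c ≠ "" ∧ c ≠ "No Name Found" then some (c, p.1, p.2) else none
  | none => none

def sort_by_company_py_alt (devices : List (String × List (String × String))) :
    List (String × List (String × List (String × String))) :=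
  let kept := devices.filterMap bKeep
  let companies := PySem.List.dedup (kept.map (fun t => t.1))
  companies.map (fun c =>
    (c, (PySem.Dict.ofList ((kept.filter (fun t => t.1 == c)).map (fun t => (t.2.1, t.2.2)))).items))

-- ===== PRECONDITION & SPEC =====
def Spec_sort_by_company_py (devices : List (String × List (String × String))) (out : List (String × List (String × List (String × String)))) : Prop := out = sort_by_company_py_alt devices
instance (devices : List (String × List (String × String))) (out : List (String × List (String × List (String × String)))) : Decidable (Spec_sort_by_company_py devices out) := by unfold Spec_sort_by_company_py; infer_instance

-- ===== CLAIM (what is proved, stated in full; the proofs are below) =====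
def Claim_equal_sort_by_company_py : Prop := ∀ (devices : List (String × List (String × String))), Dom_sort_by_company_py devices → Spec_sort_by_company_py devices (sort_by_company_py devices)

-- ===== LEMMAS AND PROOFS =====

-- insert the triples ts into the inner dict, in order
def grow (inner : PySem.Dict String (List (String × String)))
    (ts : List (String × String × List (String × String))) :
    PySem.Dict String (List (String × String)) :=
  ts.foldl (fun inn t => inn.insert t.2.1 t.2.2) inner

-- A's step, rewritten through bKeep
def insStep (d : PySem.Dict String (PySem.Dict String (List (String × String))))
    (t : String × String × List (String × String)) :
    PySem.Dict String (PySem.Dict String (List (String × String))) :=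
  if d.contains t.1 then d.insert t.1 ((d.getD t.1 PySem.Dict.empty).insert t.2.1 t.2.2)
  else d.insert t.1 (PySem.Dict.empty.insert t.2.1 t.2.2)

theorem aStep_eq (d : PySem.Dict String (PySem.Dict String (List (String × String))))
    (p : String × List (String × String)) :
    aStep d p = match bKeep p with
      | none => d
      | some t => insStep d t := by
  unfold aStep bKeep insStep
  cases h : (PySem.Dict.ofList p.2).get? "company_name" with
  | none => rfl
  | some c =>
    by_cases hc : c ≠ "" ∧ c ≠ "No Name Found"
    · simp only [if_pos hc]
      by_cases hd : d.contains c = true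
      · simp [hd]
      · simp only [Bool.not_eq_true] at hd
        simp [hd, PySem.Dict.getD_insert_self, PySem.Dict.insert_insert_self]
    · simp [hc]

theorem grow_cons (inner : PySem.Dict String (List (String × String)))
    (t : String × String × List (String × String)) ts :
    grow inner (t :: ts) = grow (inner.insert t.2.1 t.2.2) ts := rfl

theorem foldG (l : List (String × List (String × String))) :
    ∀ d : PySem.Dict String (PySem.Dict String (List (String × String))), d.keys.Nodup →
    (l.foldl aStep d).items =
      d.items.map (fun q => (q.1, grow q.2 ((l.filterMap bKeep).filter (fun t => t.1 == q.1))))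
      ++ ((PySem.List.dedup ((l.filterMap bKeep).map (fun t => t.1))).filter
            (fun c => !(d.contains c))).map
          (fun c => (c, grow PySem.Dict.empty ((l.filterMap bKeep).filter (fun t => t.1 == c)))) := by
  induction l with
  | nil =>
    intro d _
    simp [grow, PySem.List.dedup, PySem.Set.ofList]
  | cons x l ih =>
    intro d hd
    have hstep : (List.foldl aStep d (x :: l)) = List.foldl aStep (aStep d x) l := rfl
    rw [hstep, aStep_eq]
    cases hk : bKeep x with
    | none =>
      rw [ih d hd]
      simp [hk]
    | some t =>
      obtain ⟨c, mac, info⟩ := t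
      have hK : (x :: l).filterMap bKeep = (c, mac, info) :: l.filterMap bKeep := by
        simp [hk]
      by_cases hc : d.contains c = true
      · -- the company bucket already exists: insert overwrites in place
        have hins : insStep d (c, mac, info)
            = d.insert c ((d.getD c PySem.Dict.empty).insert mac info) := by
          simp [insStep, hc]
        have hd' : (d.insert c ((d.getD c PySem.Dict.empty).insert mac info)).keys.Nodup :=
          PySem.Dict.nodup_keys_insert _ _ _ hd
        rw [show (match (some (c, mac, info) : Option (String × String × List (String × String))) with | none => d | some t => insStep d t) = insStep d (c, mac, info) from rfl]
        rw [hins, ih _ hd']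
        rw [PySem.Dict.items_insert_of_contains _ _ hc]
        rw [hK]
        congr 1
        · -- existing entries
          rw [List.map_map]
          apply List.map_congr_left
          intro q hq
          by_cases hq1 : q.1 = c
          · have hqc : (q.1 == c) = true := by simp [hq1]
            have hmem : (c, q.2) ∈ d.items := by
              rw [← hq1]; exact hq
            have hget : d.getD c PySem.Dict.empty = q.2 :=
              PySem.Dict.getD_of_mem_items d hmem hd _
            simp only [Function.comp_apply, hqc, if_pos]
            simp only [List.filter_cons, hq1]
            simp [hget, grow_cons]
          · have hqc : (q.1 == c) = false := by simp [hq1]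
            simp only [Function.comp_apply, hqc]
            simp only [List.filter_cons]
            have : (((c, mac, info) : String × String × List (String × String)).1 == q.1) = false := by
              simp [Ne.symm hq1]
            simp [this]
        · -- fresh companies
          have hcontains : ∀ c', (d.insert c ((d.getD c PySem.Dict.empty).insert mac info)).contains c' = d.contains c' := by
            intro c'
            rw [PySem.Dict.contains_insert]
            by_cases h' : c' = c
            · subst h'; simp [hc]
            · simp [h']
          have hflt : ((PySem.List.dedup (((c, mac, info) :: l.filterMap bKeep).map (fun t => t.1))).filter (fun c' => !(d.contains c')))
              = ((PySem.List.dedup ((l.filterMap bKeep).map (fun t => t.1))).filter (fun c' => !(d.contains c'))) := by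
            show ((PySem.Set.ofList (c :: (l.filterMap bKeep).map (fun t => t.1))).filter (fun c' => !(d.contains c')))
              = _
            rw [PySem.Set.ofList_cons]
            show List.filter _ (c :: List.filter _ _) = _
            simp only [List.filter_cons, hc, Bool.not_true, Bool.false_eq_true, if_false,
              List.filter_filter]
            apply List.filter_congr
            intro c' _
            by_cases h' : c' = c
            · subst h'; simp [hc]
            · simp [h']
          rw [show (PySem.List.dedup = @PySem.Set.ofList String _) from rfl] at *
          simp only [hcontains]
          rw [hflt]
          apply List.map_congr_left
          intro c' hc'
          have hne : c' ≠ c := by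
            intro h'; subst h'
            have := List.of_mem_filter hc'
            simp [hc] at this
          have : (((c, mac, info) : String × String × List (String × String)).1 == c') = false := by
            simp [Ne.symm hne]
          simp [this]
      · -- new company bucket
        have hcf : d.contains c = false := by simpa using hc
        have hins : insStep d (c, mac, info)
            = d.insert c (PySem.Dict.empty.insert mac info) := by
          simp [insStep, hcf]
        have hd' : (d.insert c (PySem.Dict.empty.insert mac info)).keys.Nodup :=
          PySem.Dict.nodup_keys_insert _ _ _ hd
        rw [show (match (some (c, mac, info) : Option (String × String × List (String × String))) with | none => d | some t => insStep d t) = insStep d (c, mac, info) from rfl]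
        rw [hins, ih _ hd']
        rw [PySem.Dict.items_insert_of_not_contains _ _ hcf, hK, List.map_append,
          List.append_assoc]
        have hq_ne : ∀ q ∈ d.items, q.1 ≠ c := by
          intro q hq h'
          have : q.1 ∈ d.keys := PySem.Dict.mem_keys_of_mem_items d hq
          rw [h'] at this
          rw [← PySem.Dict.contains_iff_mem_keys] at this
          simp [hcf] at this
        have h_items : d.items.map (fun q => (q.1, grow q.2 ((l.filterMap bKeep).filter (fun t => t.1 == q.1))))
            = d.items.map (fun q => (q.1, grow q.2 (((c, mac, info) :: l.filterMap bKeep).filter (fun t => t.1 == q.1)))) := by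
          apply List.map_congr_left
          intro q hq
          have h1 : (((c, mac, info) : String × String × List (String × String)).1 == q.1) = false := by
            simp [Ne.symm (hq_ne q hq)]
          simp [h1]
        rw [h_items]
        congr 1
        have hdd : (PySem.List.dedup (((c, mac, info) :: l.filterMap bKeep).map (fun t => t.1)))
            = c :: ((PySem.List.dedup ((l.filterMap bKeep).map (fun t => t.1))).filter (fun y => !(y == c))) := by
          show PySem.Set.ofList (c :: (l.filterMap bKeep).map (fun t => t.1)) = _
          rw [PySem.Set.ofList_cons]
          rfl
        rw [hdd]
        have hfc : List.filter (fun c' => !(d.contains c'))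
              (c :: ((PySem.List.dedup ((l.filterMap bKeep).map (fun t => t.1))).filter (fun y => !(y == c))))
            = c :: List.filter (fun c' => !(d.contains c'))
              ((PySem.List.dedup ((l.filterMap bKeep).map (fun t => t.1))).filter (fun y => !(y == c))) := by
          simp [hcf]
        rw [hfc, List.map_cons]
        simp only [List.map_cons, List.map_nil, List.singleton_append]
        congr 1
        · -- the new bucket
          simp [grow_cons]
        · -- remaining fresh companies
          have hnewc : ∀ c', (d.insert c (PySem.Dict.empty.insert mac info)).contains c'
              = (c' == c || d.contains c') := fun c' => PySem.Dict.contains_insert _ _ _ _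
          have hfilter : List.filter (fun c' => !((d.insert c (PySem.Dict.empty.insert mac info)).contains c'))
                (PySem.List.dedup ((l.filterMap bKeep).map (fun t => t.1)))
              = List.filter (fun c' => !(d.contains c'))
                ((PySem.List.dedup ((l.filterMap bKeep).map (fun t => t.1))).filter (fun y => !(y == c))) := by
            rw [List.filter_filter]
            apply List.filter_congr
            intro c' _
            rw [hnewc c']
            by_cases h' : c' = c
            · subst h'; simp
            · simp [Bool.and_comm]
          rw [hfilter]
          apply List.map_congr_left
          intro c' hc'
          have hne : c' ≠ c := by
            have h2 := List.of_mem_filter (List.mem_of_mem_filter hc')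
            simpa using h2
          have h1 : (((c, mac, info) : String × String × List (String × String)).1 == c') = false := by
            simp [Ne.symm hne]
          simp [h1]

theorem grow_empty_eq_ofList (ts : List (String × String × List (String × String))) :
    grow PySem.Dict.empty ts
      = PySem.Dict.ofList (ts.map (fun t => (t.2.1, t.2.2))) := by
  show _ = List.foldl (fun (d : PySem.Dict String (List (String × String))) (p : String × List (String × String)) => d.insert p.1 p.2) PySem.Dict.empty _
  rw [List.foldl_map]
  rfl

-- ===== VERDICT (by name: the statement is the Claim_ definition above) =====
theorem sort_by_company_py_spec : Claim_equal_sort_by_company_py := by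
  intro devices _
  unfold Spec_sort_by_company_py sort_by_company_py sort_by_company_py_alt
  rw [foldG devices PySem.Dict.empty PySem.Dict.nodup_keys_empty]
  simp only [PySem.Dict.contains_empty]
  show (([] : List (String × PySem.Dict String (List (String × String)))).map _
      ++ (List.filter _ _).map _).map _ = _
  simp only [List.map_nil, List.nil_append, List.filter_true, Bool.not_false, List.map_map]
  apply List.map_congr_left
  intro c _
  simp [Function.comp, grow_empty_eq_ofList]
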